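-- pv_equiv track=rewrite | github.com/daniel-gudmundsson/Password-Cracker | JUNK/leetspeakConverter.py | leet
-- ===== SOURCE A (Python) =====
-- import itertools
--
-- def leet(word, leetDictonary):
--     symbolLists = []
--     for c in word:
--
--         if c.lower() in leetDictonary:
--             symbolLists.append(leetDictonary[c.lower()])
--         else:
--             symbolLists.append([c])
--     res = leetHelper(symbolLists)
--     return res
--
-- def leetHelper(lsts):
--     return list(itertools.product(*lsts))
-- ===== SOURCE B (Python) =====
-- def leet(word, leetDictonary):
--     pools = [leetDictonary.get(c.lower(), [c]) for c in word]
--     total = 1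
--     for p in pools:
--         total *= len(p)
--     res = []
--     for i in range(total):
--         rem = i
--         out = []
--         for p in reversed(pools):
--             rem, d = divmod(rem, len(p))
--             out.append(p[d])
--         out.reverse()
--         res.append(tuple(out))
--     return res
-- ===== Notes on version B (the rewrite author's own statement) =====
-- stated objective: alternative
-- what changed: Replaces itertools.product's accumulated-product construction with mixed-radix index decoding: B computes the total count of combinations and, for each index i in range(total), decodes i by repeated divmod over the pool lengths (rightmost digit fastest) to select one element per pool; no intermediate product lists are built.
import Mathlib
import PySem

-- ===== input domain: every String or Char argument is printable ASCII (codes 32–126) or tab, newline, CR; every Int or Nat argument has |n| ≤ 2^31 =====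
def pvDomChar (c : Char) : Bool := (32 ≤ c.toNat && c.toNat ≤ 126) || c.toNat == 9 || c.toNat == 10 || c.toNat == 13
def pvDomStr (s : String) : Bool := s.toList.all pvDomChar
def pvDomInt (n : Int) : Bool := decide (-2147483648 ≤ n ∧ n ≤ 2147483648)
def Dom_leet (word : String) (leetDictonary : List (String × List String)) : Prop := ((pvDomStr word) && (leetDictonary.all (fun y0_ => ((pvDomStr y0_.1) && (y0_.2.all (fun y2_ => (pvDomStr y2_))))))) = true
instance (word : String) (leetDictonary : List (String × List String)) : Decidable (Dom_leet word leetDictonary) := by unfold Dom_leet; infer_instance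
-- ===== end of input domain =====

-- B replaces itertools.product by mixed-radix index decoding (count the combinations, then
-- decode each index by repeated divmod over the pool lengths); alternative, not faster.

-- ===== PORT A =====
-- dict lookup (first match in the association list)
def leetLookup (d : List (String × List String)) (k : String) : Option (List String) :=
  (d.find? (fun p => p.1 == k)).map Prod.snd

-- list(itertools.product(*lsts)) ported as its documented equivalent loop:
-- result = [()]; for pool in lsts: result = [x+(y,) for x in result for y in pool]
def leetHelper (lsts : List (List String)) : List (List String) :=
  lsts.foldl (fun res pool => res.flatMap (fun x => pool.map (fun y => x ++ [y]))) [[]]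

def leet (word : String) (leetDictonary : List (String × List String)) : List (List String) :=
  let symbolLists := word.toList.foldl (fun acc c =>
    match leetLookup leetDictonary (PySem.Str.lower (String.ofList [c])) with
    | some v => acc ++ [v]
    | none   => acc ++ [[String.ofList [c]]]) []
  leetHelper symbolLists

-- ===== PORT B =====
-- rem=i; out=[]; for p in reversed(pools): rem,d = divmod(rem,len(p)); out.append(p[d]); out.reverse()
-- (rem and len(p) are nonnegative, so Python's divmod is Nat division/mod; p[d] is always
-- in range when the loop runs, so list indexing is getD)
def leetDecode (pools : List (List String)) (i : Nat) : List String :=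
  (pools.reverse.foldl
    (fun st p => (st.1 / p.length, st.2 ++ [p.getD (st.1 % p.length) ""]))
    (i, [])).2.reverse

def leet_alt (word : String) (leetDictonary : List (String × List String)) : List (List String) :=
  let pools := word.toList.map (fun c =>
    ((leetDictonary.find? (fun p => p.1 == PySem.Str.lower (String.ofList [c]))).map Prod.snd).getD
      [String.ofList [c]])
  let total := pools.foldl (fun t p => t * p.length) 1
  (List.range total).map (leetDecode pools)

-- ===== PRECONDITION & SPEC =====
def Spec_leet (word : String) (leetDictonary : List (String × List String)) (out : List (List String)) : Prop := out = leet_alt word leetDictonary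
instance (word : String) (leetDictonary : List (String × List String)) (out : List (List String)) : Decidable (Spec_leet word leetDictonary out) := by unfold Spec_leet; infer_instance

-- ===== CLAIM (what is proved, stated in full; the proofs are below) =====
def Claim_equal_leet : Prop := ∀ (word : String) (leetDictonary : List (String × List String)), Dom_leet word leetDictonary → Spec_leet word leetDictonary (leet word leetDictonary)

-- ===== LEMMAS AND PROOFS =====

-- total number of combinations
def leetTot (ps : List (List String)) : Nat := ps.foldl (fun t p => t * p.length) 1

-- proof-side cons-based product
def leetProdR (lsts : List (List String)) : List (List String) :=
  lsts.foldr (fun pool res => pool.flatMap (fun x => res.map (fun t => x :: t))) [[]]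

-- proof-side cons-based decoder: remainder after folding, and the digits list
def leetF (p : List String) (st : Nat × List String) : Nat × List String :=
  (st.1 / p.length, p.getD (st.1 % p.length) "" :: st.2)

def leetR (ps : List (List String)) (i : Nat) : Nat := (ps.foldr leetF (i, [])).1
def leetD (ps : List (List String)) (i : Nat) : List String := (ps.foldr leetF (i, [])).2

theorem leetTot_foldl (ps : List (List String)) (a : Nat) :
    ps.foldl (fun t p => t * p.length) a = a * leetTot ps := by
  induction ps generalizing a with
  | nil => simp [leetTot]
  | cons p ps ih =>
    simp only [List.foldl_cons]
    rw [ih]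
    have : leetTot (p :: ps) = p.length * leetTot ps := by
      show List.foldl _ (1 * p.length) ps = _
      rw [ih]; ring
    rw [this]; ring

theorem leetTot_cons (p : List String) (ps : List (List String)) :
    leetTot (p :: ps) = p.length * leetTot ps := by
  simpa [leetTot] using leetTot_foldl ps (1 * p.length)

-- the port's decoder (append-then-reverse over reversed pools) equals the cons decoder
theorem leetDecode_foldr (ps : List (List String)) (i : Nat) :
    ps.foldr (fun p st => (st.1 / p.length, st.2 ++ [p.getD (st.1 % p.length) ""])) (i, [])
      = (leetR ps i, (leetD ps i).reverse) := by
  induction ps with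
  | nil => simp [leetR, leetD]
  | cons p ps ih =>
    simp only [List.foldr_cons, ih]
    simp [leetR, leetD, leetF]

theorem leetDecode_eq (ps : List (List String)) (i : Nat) :
    leetDecode ps i = leetD ps i := by
  unfold leetDecode
  rw [List.foldl_reverse, leetDecode_foldr]
  simp

theorem leetRD_cons (p : List String) (ps : List (List String)) (i : Nat) :
    leetR (p :: ps) i = leetR ps i / p.length ∧
    leetD (p :: ps) i = p.getD (leetR ps i % p.length) "" :: leetD ps i := by
  constructor <;> simp [leetR, leetD, leetF]

-- periodicity: adding a*T to the index shifts the remainder and keeps the digits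
theorem leetRD_shift (ps : List (List String)) (h : 0 < leetTot ps) (a i : Nat) :
    leetR ps (a * leetTot ps + i) = a + leetR ps i ∧
    leetD ps (a * leetTot ps + i) = leetD ps i := by
  induction ps generalizing a i with
  | nil => simp [leetTot, leetR, leetD]
  | cons p ps ih =>
    rw [leetTot_cons] at h ⊢
    have hp : 0 < p.length := Nat.pos_of_ne_zero (fun h0 => by simp [h0] at h)
    have hT : 0 < leetTot ps := Nat.pos_of_ne_zero (fun h0 => by simp [h0] at h)
    have key : a * (p.length * leetTot ps) + i = (a * p.length) * leetTot ps + i := by ring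
    obtain ⟨ihR, ihD⟩ := ih hT (a * p.length) i
    rw [key]
    obtain ⟨cR, cD⟩ := leetRD_cons p ps ((a * p.length) * leetTot ps + i)
    obtain ⟨cR', cD'⟩ := leetRD_cons p ps i
    constructor
    · rw [cR, cR', ihR, Nat.mul_comm a p.length, Nat.mul_add_div hp]
    · rw [cD, cD', ihR, ihD, Nat.mul_comm a p.length, Nat.mul_add_mod]

theorem leetR_lt_eq_zero (ps : List (List String)) (i : Nat) (h : i < leetTot ps) :
    leetR ps i = 0 := by
  induction ps generalizing i with
  | nil =>
    have hi : i = 0 := Nat.lt_one_iff.mp (by simpa [leetTot] using h)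
    subst hi
    simp [leetR]
  | cons p ps ih =>
    rw [leetTot_cons] at h
    have hT : 0 < leetTot ps := Nat.pos_of_ne_zero (fun h0 => by simp [h0] at h)
    have hq : i / leetTot ps < p.length :=
      Nat.div_lt_of_lt_mul (by rw [Nat.mul_comm]; exact h)
    obtain ⟨cR, _⟩ := leetRD_cons p ps i
    rw [cR]
    conv_lhs => rw [← Nat.div_add_mod i (leetTot ps), Nat.mul_comm (leetTot ps)]
    rw [(leetRD_shift ps hT (i / leetTot ps) (i % leetTot ps)).1,
      ih (i % leetTot ps) (Nat.mod_lt _ hT), Nat.add_zero]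
    exact Nat.div_eq_of_lt hq

-- range (L*T) enumerated block-wise
theorem leet_range_mul (L T : Nat) :
    List.range (L * T) = (List.range L).flatMap (fun a => (List.range T).map (fun b => a * T + b)) := by
  induction L with
  | zero => simp
  | succ L ih =>
    rw [Nat.succ_mul, List.range_add, ih, List.range_succ]
    simp

-- flatMap over a list = flatMap over its indices
theorem leet_flatMap_index {α β : Type} (p : List α) (d : α) (h : α → List β) :
    p.flatMap h = (List.range p.length).flatMap (fun a => h (p.getD a d)) := by
  induction p with
  | nil => simp
  | cons x p ih =>
    rw [List.length_cons, List.range_succ_eq_map]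
    simp [ih, List.flatMap_map, List.getD]

-- main: the cons product equals index decoding
theorem leetProdR_eq_decode (ps : List (List String)) :
    leetProdR ps = (List.range (leetTot ps)).map (leetD ps) := by
  induction ps with
  | nil =>
    simp [leetProdR, leetTot, List.range_succ]
    simp [leetD]
  | cons p ps ih =>
    by_cases hT : leetTot ps = 0
    · have hnil : leetProdR ps = [] := by rw [ih, hT]; simp
      rw [show leetProdR (p :: ps)
          = p.flatMap (fun x => (leetProdR ps).map (fun t => x :: t)) from rfl, hnil]
      simp [leetTot_cons, hT]
    · have hTpos : 0 < leetTot ps := Nat.pos_of_ne_zero hT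
      have lhs : leetProdR (p :: ps) =
          p.flatMap (fun x => (List.range (leetTot ps)).map (fun j => x :: leetD ps j)) := by
        simp only [leetProdR, List.foldr_cons]
        rw [show ps.foldr (fun pool res => pool.flatMap fun x => res.map fun t => x :: t) [[]] = leetProdR ps from rfl, ih]
        simp [List.map_map, Function.comp_def]
      rw [lhs, leetTot_cons, leet_range_mul, List.map_flatMap,
        leet_flatMap_index p "" (fun x => (List.range (leetTot ps)).map (fun j => x :: leetD ps j))]
      apply List.flatMap_congr
      intro a ha
      rw [List.map_map]
      apply List.map_congr_left
      intro j hj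
      have ha' : a < p.length := List.mem_range.mp ha
      have hj' : j < leetTot ps := List.mem_range.mp hj
      obtain ⟨cR, cD⟩ := leetRD_cons p ps (a * leetTot ps + j)
      obtain ⟨sR, sD⟩ := leetRD_shift ps hTpos a j
      simp only [Function.comp]
      rw [cD, sR, sD, leetR_lt_eq_zero ps j hj', Nat.add_zero, Nat.mod_eq_of_lt ha']

-- A-side: the foldl building symbolLists equals a map
theorem leet_symbolLists_eq_map (d : List (String × List String)) (cs : List Char) (acc : List (List String)) :
    cs.foldl (fun acc c =>
      match leetLookup d (PySem.Str.lower (String.ofList [c])) with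
      | some v => acc ++ [v]
      | none   => acc ++ [[String.ofList [c]]]) acc
    = acc ++ cs.map (fun c =>
        (leetLookup d (PySem.Str.lower (String.ofList [c]))).getD [String.ofList [c]]) := by
  induction cs generalizing acc with
  | nil => simp
  | cons c cs ih =>
    simp only [List.foldl_cons, List.map_cons]
    cases h : leetLookup d (PySem.Str.lower (String.ofList [c])) with
    | none => simp [ih]
    | some v => simp [ih]

-- A-side: the iterative product (left fold) equals the cons-based product
theorem leet_foldl_eq_prod (lsts : List (List String)) (acc : List (List String)) :
    lsts.foldl (fun res pool => res.flatMap (fun x => pool.map (fun y => x ++ [y]))) acc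
    = acc.flatMap (fun x => (leetProdR lsts).map (fun t => x ++ t)) := by
  induction lsts generalizing acc with
  | nil => simp [leetProdR]
  | cons l ls ih =>
    simp only [List.foldl_cons, ih, leetProdR, List.foldr_cons]
    simp [List.flatMap_assoc, List.flatMap_map, List.map_flatMap, List.map_map,
      Function.comp_def, List.append_assoc]

-- ===== VERDICT (by name: the statement is the Claim_ definition above) =====
theorem leet_spec : Claim_equal_leet := by
  intro word d _
  show leet word d = leet_alt word d
  unfold leet leet_alt leetHelper
  rw [leet_symbolLists_eq_map, leet_foldl_eq_prod]
  simp only [List.nil_append]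
  rw [show (word.toList.map (fun c =>
      (leetLookup d (PySem.Str.lower (String.ofList [c]))).getD [String.ofList [c]]))
    = (word.toList.map (fun c =>
      ((d.find? (fun p => p.1 == PySem.Str.lower (String.ofList [c]))).map Prod.snd).getD
        [String.ofList [c]])) from by simp [leetLookup]]
  rw [show (word.toList.map fun c =>
      ((d.find? fun p => p.1 == PySem.Str.lower (String.ofList [c])).map Prod.snd).getD
        [String.ofList [c]]).foldl (fun t p => t * p.length) 1
    = leetTot _ from rfl]
  rw [leetProdR_eq_decode]
  simp [leetDecode_eq]
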